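-- pv_equiv track=rewrite | github.com/stenknutsen/HomeGrownPOSTagger | PhaseThreeTagging.py | another_ed_PRPS_VerbTagger
-- ===== SOURCE A (Python) =====
-- def another_ed_PRPS_VerbTagger(sent):
--     sentToReturn = []
--     skip = 0
--
--     for i in range(len(sent)):
--
--         if skip>0:
--             skip = skip -1
--             continue
--
--         if (i)<0 | (i+2)>=len(sent):
--             sentToReturn += [sent[i]]
--             continue
--
--         leftContext = sent[i]
--         target = sent[i+1]
--         rightContext = sent[i+2]
--
--         if (leftContext[0].lower()=="another")&((target[0].lower().endswith("ed")))&(rightContext[1]=="PRP$"):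
--
--             sentToReturn += [(leftContext[0],"DT")]
--             sentToReturn += [(target[0],"V")]
--             sentToReturn += [rightContext]
--             skip = 2
--
--         else:
--             sentToReturn += [leftContext]
--
--     return sentToReturn
-- ===== SOURCE B (Python) =====
-- def another_ed_PRPS_VerbTagger(sent):
--     # Recursive decomposition: pattern-match the first three tokens, jump by 3 on a match, by 1 otherwise.
--     if (len(sent) >= 3
--             and sent[0][0].lower() == "another"
--             and sent[1][0].lower().endswith("ed")
--             and sent[2][1] == "PRP$"):
--         return [(sent[0][0], "DT"), (sent[1][0], "V"), sent[2]] + another_ed_PRPS_VerbTagger(sent[3:])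
--     if sent:
--         return [sent[0]] + another_ed_PRPS_VerbTagger(sent[1:])
--     return []
-- ===== Notes on version B (the rewrite author's own statement) =====
-- stated objective: simpler
-- what changed: Replaced the index loop with a skip counter (and the accidental-but-harmless chained-comparison boundary test) by a direct recursion that pattern-matches the first three tokens and jumps by 3 on a match, by 1 otherwise.
import Mathlib
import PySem

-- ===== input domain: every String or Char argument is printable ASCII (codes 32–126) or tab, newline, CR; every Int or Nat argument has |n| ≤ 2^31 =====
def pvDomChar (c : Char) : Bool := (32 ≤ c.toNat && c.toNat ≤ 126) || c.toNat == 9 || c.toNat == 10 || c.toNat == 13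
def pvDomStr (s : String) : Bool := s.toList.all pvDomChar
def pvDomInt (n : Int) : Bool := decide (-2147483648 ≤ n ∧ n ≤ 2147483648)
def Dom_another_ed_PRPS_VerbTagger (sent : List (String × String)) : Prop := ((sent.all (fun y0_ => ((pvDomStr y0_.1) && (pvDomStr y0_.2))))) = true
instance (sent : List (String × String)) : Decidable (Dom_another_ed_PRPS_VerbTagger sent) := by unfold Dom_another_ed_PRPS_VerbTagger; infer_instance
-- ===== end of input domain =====

-- B replaces A's index loop with a skip counter by a direct recursion that pattern-matches the
-- first three tokens and jumps by 3 on a match (objective: simpler). Return values only; neither mutates.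

-- ===== PORT A =====
-- Loop body of A's 'for i in range(len(sent))', state = (sentToReturn, skip).
-- Python's '(i)<0 | (i+2)>=len(sent)' is the chained comparison 'i < (0|(i+2)) and (0|(i+2)) >= len(sent)'
-- (| binds tighter than comparisons); ported literally with PySem.Int.bor.
-- sent[i] is ported as pyGetD with a dummy default: every index reached is in range, so this is exact.
def pvStepA (sent : List (String × String)) (st : List (String × String) × Int) (i : Int) :
    List (String × String) × Int :=
  if st.2 > 0 then (st.1, st.2 - 1)
  else if i < PySem.Int.bor 0 (i+2) ∧ PySem.Int.bor 0 (i+2) ≥ (sent.length : Int) then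
    (st.1 ++ [PySem.List.pyGetD sent i ("", "")], st.2)
  else
    let leftContext := PySem.List.pyGetD sent i ("", "")
    let target := PySem.List.pyGetD sent (i+1) ("", "")
    let rightContext := PySem.List.pyGetD sent (i+2) ("", "")
    if PySem.Str.lower leftContext.1 == "another" &&
       PySem.Str.endswith (PySem.Str.lower target.1) "ed" && rightContext.2 == "PRP$" then
      (st.1 ++ [(leftContext.1, "DT")] ++ [(target.1, "V")] ++ [rightContext], 2)
    else (st.1 ++ [leftContext], st.2)

def another_ed_PRPS_VerbTagger (sent : List (String × String)) : List (String × String) :=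
  ((PySem.List.pyRange 0 (sent.length : Int) 1).foldl (pvStepA sent) ([], 0)).1

-- ===== PORT B =====
def another_ed_PRPS_VerbTagger_alt : List (String × String) → List (String × String)
  | l :: t :: r :: rest =>
    if PySem.Str.lower l.1 == "another" &&
       PySem.Str.endswith (PySem.Str.lower t.1) "ed" && r.2 == "PRP$" then
      (l.1, "DT") :: (t.1, "V") :: r :: another_ed_PRPS_VerbTagger_alt rest
    else l :: another_ed_PRPS_VerbTagger_alt (t :: r :: rest)
  | xs => xs

-- ===== PRECONDITION & SPEC =====
def Spec_another_ed_PRPS_VerbTagger (sent : List (String × String)) (out : List (String × String)) : Prop := out = another_ed_PRPS_VerbTagger_alt sent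
instance (sent : List (String × String)) (out : List (String × String)) : Decidable (Spec_another_ed_PRPS_VerbTagger sent out) := by unfold Spec_another_ed_PRPS_VerbTagger; infer_instance

-- ===== CLAIM (what is proved, stated in full; the proofs are below) =====
def Claim_equal_another_ed_PRPS_VerbTagger : Prop := ∀ (sent : List (String × String)), Dom_another_ed_PRPS_VerbTagger sent → Spec_another_ed_PRPS_VerbTagger sent (another_ed_PRPS_VerbTagger sent)

-- ===== LEMMAS AND PROOFS =====

lemma alt_short (xs : List (String × String)) (h : xs.length < 3) :
    another_ed_PRPS_VerbTagger_alt xs = xs := by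
  match xs, h with
  | [], _ => rfl
  | [_], _ => rfl
  | [_, _], _ => rfl


lemma loop_eq (sent : List (String × String)) :
    ∀ m k (acc : List (String × String)), sent.length - k = m →
    ((PySem.List.pyRange (k : Int) (sent.length : Int) 1).foldl (pvStepA sent) (acc, 0)).1
      = acc ++ another_ed_PRPS_VerbTagger_alt (sent.drop k) := by
  intro m
  induction m using Nat.strong_induction_on with
  | _ m ih =>
    intro k acc hm
    by_cases hk : sent.length ≤ k
    · rw [PySem.List.pyRange_one_eq_nil (by exact_mod_cast hk), List.drop_eq_nil_of_le hk]
      simp [another_ed_PRPS_VerbTagger_alt]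
    · rw [not_le] at hk
      have hkI : (k : Int) < (sent.length : Int) := by exact_mod_cast hk
      have hbor : PySem.Int.bor 0 ((k : Int) + 2) = (k : Int) + 2 := by
        rw [PySem.Int.bor_comm]; exact PySem.Int.bor_zero _
      have hg0 : PySem.List.pyGetD sent (k : Int) ("", "") = sent[k] := by
        rw [PySem.List.pyGetD_natCast]
        exact List.getD_eq_getElem sent ("", "") hk
      rw [PySem.List.pyRange_one_cons hkI, List.foldl_cons]
      by_cases hb : sent.length ≤ k + 2
      · -- tail of length 1 or 2: boundary branch of A, fall-through of B
        have hstep : pvStepA sent (acc, 0) (k : Int) = (acc ++ [sent[k]], 0) := by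
          simp only [pvStepA, hbor, hg0]
          rw [if_neg (by omega), if_pos ⟨by omega, by exact_mod_cast hb⟩]
        rw [hstep]
        have e1 : (k : Int) + 1 = ((k + 1 : Nat) : Int) := by push_cast; ring
        rw [e1, ih (m - 1) (by omega) (k + 1) _ (by omega)]
        have hshort1 : another_ed_PRPS_VerbTagger_alt (sent.drop (k+1)) = sent.drop (k+1) :=
          alt_short _ (by simp; omega)
        have hshort2 : another_ed_PRPS_VerbTagger_alt ((sent[k]'hk) :: sent.drop (k+1))
            = (sent[k]'hk) :: sent.drop (k+1) := alt_short _ (by simp; omega)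
        rw [List.drop_eq_getElem_cons hk, hshort1, hshort2]
        simp
      · rw [not_le] at hb
        have hk1 : k + 1 < sent.length := by omega
        have hk2 : k + 2 < sent.length := by omega
        have e1 : (k : Int) + 1 = ((k + 1 : Nat) : Int) := by push_cast; ring
        have e2 : (k : Int) + 2 = ((k + 2 : Nat) : Int) := by push_cast; ring
        have hg1 : PySem.List.pyGetD sent ((k : Int) + 1) ("", "") = sent[k+1] := by
          rw [e1, PySem.List.pyGetD_natCast]
          exact List.getD_eq_getElem sent ("", "") hk1
        have hg2 : PySem.List.pyGetD sent ((k : Int) + 2) ("", "") = sent[k+2] := by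
          rw [e2, PySem.List.pyGetD_natCast]
          exact List.getD_eq_getElem sent ("", "") hk2
        have hdrop : sent.drop k = sent[k] :: sent[k+1] :: sent[k+2] :: sent.drop (k+3) := by
          rw [List.drop_eq_getElem_cons hk, List.drop_eq_getElem_cons hk1,
              List.drop_eq_getElem_cons hk2]
        by_cases hc : (PySem.Str.lower (sent[k]'hk).1 == "another" &&
            PySem.Str.endswith (PySem.Str.lower (sent[k+1]'hk1).1) "ed" &&
            (sent[k+2]'hk2).2 == "PRP$") = true
        · -- match: A emits three tokens then skips twice; B jumps by 3
          have hstep : pvStepA sent (acc, 0) (k : Int)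
              = (acc ++ [((sent[k]'hk).1, "DT")] ++ [((sent[k+1]'hk1).1, "V")] ++ [sent[k+2]'hk2], 2) := by
            simp only [pvStepA, hbor, hg0, hg1, hg2]
            rw [if_neg (by omega), if_neg (by omega), if_pos hc]
          rw [hstep]
          have hkI1 : ((k : Int) + 1) < (sent.length : Int) := by omega
          have hkI2 : ((k : Int) + 1 + 1) < (sent.length : Int) := by omega
          rw [PySem.List.pyRange_one_cons hkI1, List.foldl_cons,
              PySem.List.pyRange_one_cons hkI2, List.foldl_cons]
          have hs1 : pvStepA sent (acc ++ [((sent[k]'hk).1, "DT")] ++ [((sent[k+1]'hk1).1, "V")] ++ [sent[k+2]'hk2], 2) ((k : Int) + 1)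
              = (acc ++ [((sent[k]'hk).1, "DT")] ++ [((sent[k+1]'hk1).1, "V")] ++ [sent[k+2]'hk2], 1) := by
            simp only [pvStepA]; rw [if_pos (by omega)]; norm_num
          have hs2 : pvStepA sent (acc ++ [((sent[k]'hk).1, "DT")] ++ [((sent[k+1]'hk1).1, "V")] ++ [sent[k+2]'hk2], 1) ((k : Int) + 1 + 1)
              = (acc ++ [((sent[k]'hk).1, "DT")] ++ [((sent[k+1]'hk1).1, "V")] ++ [sent[k+2]'hk2], 0) := by
            simp only [pvStepA]; rw [if_pos (by omega)]; norm_num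
          rw [hs1, hs2]
          have e3 : (k : Int) + 1 + 1 + 1 = ((k + 3 : Nat) : Int) := by push_cast; ring
          rw [e3, ih (m - 3) (by omega) (k + 3) _ (by omega)]
          conv_rhs => rw [hdrop, another_ed_PRPS_VerbTagger_alt]
          rw [if_pos hc]
          simp
        · -- no match: both emit one token and advance by 1
          have hstep : pvStepA sent (acc, 0) (k : Int) = (acc ++ [sent[k]], 0) := by
            simp only [pvStepA, hbor, hg0, hg1, hg2]
            rw [if_neg (by omega), if_neg (by omega), if_neg hc]
          rw [hstep]
          rw [e1, ih (m - 1) (by omega) (k + 1) _ (by omega)]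
          have hdrop1 : sent.drop (k+1) = sent[k+1] :: sent[k+2] :: sent.drop (k+3) := by
            rw [List.drop_eq_getElem_cons hk1, List.drop_eq_getElem_cons hk2]
          conv_rhs => rw [hdrop, another_ed_PRPS_VerbTagger_alt]
          rw [if_neg hc, hdrop1]
          simp

-- ===== VERDICT (by name: the statement is the Claim_ definition above) =====
theorem another_ed_PRPS_VerbTagger_spec : Claim_equal_another_ed_PRPS_VerbTagger := by
  intro sent _
  unfold Spec_another_ed_PRPS_VerbTagger another_ed_PRPS_VerbTagger
  have := loop_eq sent sent.length 0 [] (by omega)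
  simpa using this
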